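-- pv_equiv track=rewrite | github.com/1mirabbas/crtsrch | crtsrch.py | process_names
-- ===== SOURCE A (Python) =====
-- def process_names(names, strip_wildcard):
--     """Remove duplicates, optionally strip *. prefix, return sorted."""
--     seen = set()
--     result = []
--     for name in names:
--         s = name.replace("*.", "") if strip_wildcard else name
--         if s and s not in seen:
--             seen.add(s)
--             result.append(s)
--     return sorted(result)
-- ===== SOURCE B (Python) =====
-- def process_names(names, strip_wildcard):
--     """Remove duplicates, optionally strip *. prefix, return sorted."""
--     transformed = []
--     for name in names:
--         s = name.replace("*.", "") if strip_wildcard else name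
--         if s:
--             transformed.append(s)
--     transformed.sort()
--     out = []
--     for s in transformed:
--         if not out or out[-1] != s:
--             out.append(s)
--     return out
-- ===== Notes on version B (the rewrite author's own statement) =====
-- stated objective: alternative
-- what changed: Replaces A's hash-set membership filter during the input scan by a sort of all transformed non-empty names followed by a single linear pass that drops adjacent duplicates; no set is maintained.
import Mathlib
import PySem

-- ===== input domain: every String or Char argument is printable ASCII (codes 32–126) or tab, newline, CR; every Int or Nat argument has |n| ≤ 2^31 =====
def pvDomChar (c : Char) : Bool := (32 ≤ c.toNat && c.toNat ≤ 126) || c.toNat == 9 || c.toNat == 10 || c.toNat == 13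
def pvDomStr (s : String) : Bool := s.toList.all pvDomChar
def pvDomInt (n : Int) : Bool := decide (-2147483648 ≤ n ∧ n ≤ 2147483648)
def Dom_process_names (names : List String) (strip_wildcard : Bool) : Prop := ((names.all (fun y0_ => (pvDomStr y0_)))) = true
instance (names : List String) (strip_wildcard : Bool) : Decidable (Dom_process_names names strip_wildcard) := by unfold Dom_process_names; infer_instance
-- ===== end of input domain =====

-- B replaces A's hash-set dedup-during-scan by sort-then-adjacent-dedup (alternative decomposition, same cost).

-- ===== PORT A =====
def process_names (names : List String) (strip_wildcard : Bool) : List String :=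
  let st := names.foldl (fun (acc : PySem.Set String × List String) name =>
      let s := if strip_wildcard then PySem.Str.replace name "*." "" else name
      if s ≠ "" ∧ s ∉ acc.1 then (PySem.Set.add acc.1 s, acc.2 ++ [s]) else acc)
    (PySem.Set.empty, [])
  PySem.List.sorted st.2 (fun x => x) false

-- ===== PORT B =====
def process_names_alt (names : List String) (strip_wildcard : Bool) : List String :=
  let transformed := (names.map (fun name =>
      if strip_wildcard then PySem.Str.replace name "*." "" else name)).filter (fun s => s ≠ "")
  let sortedT := PySem.List.sorted transformed (fun x => x) false
  sortedT.foldl (fun out s => if out = [] ∨ out.getLast? ≠ some s then out ++ [s] else out) []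

-- ===== PRECONDITION & SPEC =====
def Spec_process_names (names : List String) (strip_wildcard : Bool) (out : List String) : Prop := out = process_names_alt names strip_wildcard
instance (names : List String) (strip_wildcard : Bool) (out : List String) : Decidable (Spec_process_names names strip_wildcard out) := by unfold Spec_process_names; infer_instance

-- ===== CLAIM (what is proved, stated in full; the proofs are below) =====
def Claim_equal_process_names : Prop := ∀ (names : List String) (strip_wildcard : Bool), Dom_process_names names strip_wildcard → Spec_process_names names strip_wildcard (process_names names strip_wildcard)

-- ===== LEMMAS AND PROOFS =====

-- A's loop: the result list is duplicate-free and holds exactly the non-empty transformed names.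
theorem loopA_inv (l : List String) (seen : PySem.Set String) (result : List String)
    (hinv : ∀ x, x ∈ seen ↔ x ∈ result) (hnd : result.Nodup) :
    (l.foldl (fun (acc : PySem.Set String × List String) s =>
        if s ≠ "" ∧ s ∉ acc.1 then (PySem.Set.add acc.1 s, acc.2 ++ [s]) else acc)
      (seen, result)).2.Nodup ∧
    (∀ x, x ∈ (l.foldl (fun (acc : PySem.Set String × List String) s =>
        if s ≠ "" ∧ s ∉ acc.1 then (PySem.Set.add acc.1 s, acc.2 ++ [s]) else acc)
      (seen, result)).2 ↔ x ∈ result ∨ (x ∈ l ∧ x ≠ "")) := by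
  induction l generalizing seen result with
  | nil => exact ⟨hnd, fun x => by simp⟩
  | cons s t ih =>
    by_cases h : s ≠ "" ∧ s ∉ seen
    · have hinv' : ∀ x, x ∈ PySem.Set.add seen s ↔ x ∈ result ++ [s] := by
        intro x
        simp [PySem.Set.mem_add, hinv x]
      have hnd' : (result ++ [s]).Nodup := by
        have hs : s ∉ result := fun hs => h.2 ((hinv s).mpr hs)
        simp [List.nodup_append, hnd]
        exact fun a ha hb => hs (hb ▸ ha)
      have := ih (PySem.Set.add seen s) (result ++ [s]) hinv' hnd'
      simp only [List.foldl_cons, if_pos h]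
      refine ⟨this.1, fun x => ?_⟩
      rw [this.2 x]
      simp only [List.mem_append, List.mem_cons, List.not_mem_nil, or_false]
      constructor
      · rintro ((hx | rfl) | ⟨hx, hne⟩)
        · exact Or.inl hx
        · exact Or.inr ⟨Or.inl rfl, h.1⟩
        · exact Or.inr ⟨Or.inr hx, hne⟩
      · rintro (hx | ⟨(rfl | hx), hne⟩)
        · exact Or.inl (Or.inl hx)
        · exact Or.inl (Or.inr rfl)
        · exact Or.inr ⟨hx, hne⟩
    · have := ih seen result hinv hnd
      simp only [List.foldl_cons, if_neg h]
      refine ⟨this.1, fun x => ?_⟩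
      rw [this.2 x]
      simp only [List.mem_cons]
      constructor
      · rintro (hx | ⟨hx, hne⟩)
        · exact Or.inl hx
        · exact Or.inr ⟨Or.inr hx, hne⟩
      · rintro (hx | ⟨(rfl | hx), hne⟩)
        · exact Or.inl hx
        · rcases not_and_or.mp h with h1 | h2
          · exact absurd hne (by simpa using h1)
          · exact Or.inl ((hinv x).mp (not_not.mp h2))
        · exact Or.inr ⟨hx, hne⟩

-- in a strictly increasing list, every element is ≤ the last one
theorem le_getLast_of_pairwise_lt (l : List String) (hl : l.Pairwise (· < ·)) :
    ∀ a ∈ l, ∀ m, l.getLast? = some m → a ≤ m := by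
  induction l with
  | nil => simp
  | cons y t ih =>
    intro a ha m hm
    cases t with
    | nil =>
      simp at ha hm
      simp [ha, hm]
    | cons z u =>
      rw [List.getLast?_cons_cons] at hm
      rcases List.mem_cons.mp ha with rfl | ha'
      · have hm' : m ∈ z :: u := List.mem_of_getLast? hm
        exact le_of_lt ((List.pairwise_cons.mp hl).1 m hm')
      · exact ih (List.pairwise_cons.mp hl).2 a ha' m hm

-- B's second loop: adjacent-dedup of a sorted run is strictly increasing with the same members.
theorem loopB_inv (l acc : List String)
    (hacc : acc.Pairwise (· < ·)) (hl : l.Pairwise (· ≤ ·))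
    (hle : ∀ a ∈ acc, ∀ b ∈ l, a ≤ b) :
    (l.foldl (fun out s => if out = [] ∨ out.getLast? ≠ some s then out ++ [s] else out) acc).Pairwise (· < ·) ∧
    (∀ x, x ∈ l.foldl (fun out s => if out = [] ∨ out.getLast? ≠ some s then out ++ [s] else out) acc ↔ x ∈ acc ∨ x ∈ l) := by
  induction l generalizing acc with
  | nil => exact ⟨hacc, fun x => by simp⟩
  | cons y t ih =>
    have hyt : ∀ b ∈ t, y ≤ b := (List.pairwise_cons.mp hl).1
    have ht : t.Pairwise (· ≤ ·) := (List.pairwise_cons.mp hl).2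
    by_cases h : acc = [] ∨ acc.getLast? ≠ some y
    · -- append y
      have hlt : ∀ a ∈ acc, a < y := by
        intro a ha
        have hay : a ≤ y := hle a ha y (List.mem_cons_self ..)
        rcases h with h0 | hne
        · simp [h0] at ha
        · refine lt_of_le_of_ne hay ?_
          rintro rfl
          obtain ⟨m, hm⟩ := Option.isSome_iff_exists.mp
            (List.getLast?_isSome.mpr (List.ne_nil_of_mem ha))
          have ham : a ≤ m := le_getLast_of_pairwise_lt acc hacc a ha m hm
          have hma : m ≤ a := hle m (List.mem_of_getLast? hm) a (List.mem_cons_self ..)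
          exact hne (by rw [hm, le_antisymm hma ham])
      have hacc' : (acc ++ [y]).Pairwise (· < ·) := by
        rw [List.pairwise_append]
        exact ⟨hacc, by simp, by simpa using hlt⟩
      have hle' : ∀ a ∈ acc ++ [y], ∀ b ∈ t, a ≤ b := by
        intro a ha b hb
        rcases List.mem_append.mp ha with ha' | ha'
        · exact hle a ha' b (List.mem_cons_of_mem _ hb)
        · simp only [List.mem_cons, List.not_mem_nil, or_false] at ha'
          subst ha'
          exact hyt b hb
      have := ih (acc ++ [y]) hacc' ht hle'
      simp only [List.foldl_cons, if_pos h]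
      refine ⟨this.1, fun x => ?_⟩
      rw [this.2 x]
      simp only [List.mem_append, List.mem_cons, List.not_mem_nil, or_false]
      tauto
    · -- skip: y is already the last element of acc
      have h2 : acc.getLast? = some y := not_not.mp (not_or.mp h).2
      have hy : y ∈ acc := List.mem_of_getLast? h2
      have := ih acc hacc ht (fun a ha b hb => hle a ha b (List.mem_cons_of_mem _ hb))
      simp only [List.foldl_cons, if_neg h]
      refine ⟨this.1, fun x => ?_⟩
      rw [this.2 x]
      simp only [List.mem_cons]
      constructor
      · rintro (hx | hx)
        · exact Or.inl hx
        · exact Or.inr (Or.inr hx)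
      · rintro (hx | (rfl | hx))
        · exact Or.inl hx
        · exact Or.inl hy
        · exact Or.inr hx

-- the two pipelines agree for ANY per-name transform g (instantiated with A's/B's strip step)
theorem main_eq (g : String → String) (names : List String) :
    PySem.List.sorted
      (names.foldl (fun (acc : PySem.Set String × List String) name =>
          if g name ≠ "" ∧ g name ∉ acc.1 then (PySem.Set.add acc.1 (g name), acc.2 ++ [g name]) else acc)
        (PySem.Set.empty, [])).2 (fun x => x) false
    = (PySem.List.sorted ((names.map g).filter (fun s => s ≠ "")) (fun x => x) false).foldl
        (fun out s => if out = [] ∨ out.getLast? ≠ some s then out ++ [s] else out) [] := by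
  have hfold :
      names.foldl (fun (acc : PySem.Set String × List String) name =>
          if g name ≠ "" ∧ g name ∉ acc.1 then (PySem.Set.add acc.1 (g name), acc.2 ++ [g name]) else acc)
        (PySem.Set.empty, [])
      = (names.map g).foldl (fun (acc : PySem.Set String × List String) s =>
          if s ≠ "" ∧ s ∉ acc.1 then (PySem.Set.add acc.1 s, acc.2 ++ [s]) else acc)
        (PySem.Set.empty, []) := by
    rw [List.foldl_map]
  rw [hfold]
  have hA := loopA_inv (names.map g) PySem.Set.empty []
    (by intro x; simp [PySem.Set.empty]) List.nodup_nil
  have hsorted : (PySem.List.sorted ((names.map g).filter (fun s => s ≠ "")) (fun x => x) false).Pairwise (· ≤ ·) :=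
    PySem.List.sorted_pairwise ..
  have hB := loopB_inv (PySem.List.sorted ((names.map g).filter (fun s => s ≠ "")) (fun x => x) false)
    [] List.Pairwise.nil hsorted (by simp)
  have hperm : ((PySem.List.sorted ((names.map g).filter (fun s => s ≠ "")) (fun x => x) false).foldl
        (fun out s => if out = [] ∨ out.getLast? ≠ some s then out ++ [s] else out) []).Perm
      ((names.map g).foldl (fun (acc : PySem.Set String × List String) s =>
          if s ≠ "" ∧ s ∉ acc.1 then (PySem.Set.add acc.1 s, acc.2 ++ [s]) else acc)
        (PySem.Set.empty, [])).2 := by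
    rw [List.perm_ext_iff_of_nodup (hB.1.imp ne_of_lt) hA.1]
    intro x
    rw [hB.2 x, hA.2 x]
    simp [PySem.List.mem_sorted, List.mem_filter]
  exact PySem.List.sorted_eq_of_perm_of_pairwise_lt _ _ _ hperm hB.1

-- ===== VERDICT (by name: the statement is the Claim_ definition above) =====
theorem process_names_spec : Claim_equal_process_names := by
  intro names strip_wildcard _
  exact main_eq (fun name => if strip_wildcard then PySem.Str.replace name "*." "" else name) names
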